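-- pv_equiv track=rewrite | github.com/ZhhZh329/SafeContextualReward | src/data_construction/document_synthesis/document_synthesis4rpj_unsafe.py | _interior_space_positions
-- ===== SOURCE A (Python) =====
-- from typing import List, Dict, Any, Tuple, Optional, Literal
--
-- def _interior_space_positions(s: str) -> List[int]:
--     # 忽略句首/句尾空格，只允许内部空格插入
--     n = len(s)
--     l = 0
--     while l < n and s[l] == ' ':
--         l += 1
--     r = n - 1
--     while r >= 0 and s[r] == ' ':
--         r -= 1
--     if r - l < 1:
--         return []
--     return [i for i in range(l + 1, r) if s[i] == ' ']
-- ===== SOURCE B (Python) =====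
-- from typing import List
--
-- def _interior_space_positions(s: str) -> List[int]:
--     # Split on the single-space separator: every space in s is exactly one gap between
--     # consecutive parts.  A gap is interior iff some non-empty part lies at
--     # or before it and some non-empty part lies after it, i.e. its index k
--     # satisfies first <= k < last where first/last are the indices of the
--     # first and last non-empty parts.
--     parts = s.split(' ')
--     gaps = []
--     pos = 0
--     for p in parts[:-1]:
--         pos += len(p)
--         gaps.append(pos)
--         pos += 1
--     nonempty = [k for k, p in enumerate(parts) if p]
--     if not nonempty:
--         return []
--     return gaps[nonempty[0]:nonempty[-1]]
-- ===== Notes on version B (the rewrite author's own statement) =====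
-- stated objective: alternative
-- what changed: B never scans characters or trims boundaries itself: it splits the string on the space separator into parts, computes each gap's absolute position from part-length prefix sums, and returns the slice of gaps lying between the first and last non-empty parts.
import Mathlib
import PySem

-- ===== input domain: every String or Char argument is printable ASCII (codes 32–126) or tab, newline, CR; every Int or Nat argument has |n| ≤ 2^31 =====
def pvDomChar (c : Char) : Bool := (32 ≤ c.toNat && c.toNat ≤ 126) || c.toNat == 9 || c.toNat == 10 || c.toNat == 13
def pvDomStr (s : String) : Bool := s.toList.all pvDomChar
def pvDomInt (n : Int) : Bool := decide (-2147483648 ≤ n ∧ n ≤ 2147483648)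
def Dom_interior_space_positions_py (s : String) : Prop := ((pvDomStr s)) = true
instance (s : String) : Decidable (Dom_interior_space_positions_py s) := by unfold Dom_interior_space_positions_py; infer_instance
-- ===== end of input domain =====

-- B replaces A's boundary while-loops and index-range scan by a split on the space separator:
-- gap positions come from part-length prefix sums, and the answer is the slice of
-- gaps between the first and last non-empty parts (objective: alternative).

-- ===== PORT A =====
-- while l < n and s[l] == ' ': l += 1
def pvSpcWhileL (cs : List Char) (l : Nat) : Nat :=
  if h : l < cs.length then
    if cs[l] == ' ' then pvSpcWhileL cs (l + 1) else l
  else l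
termination_by cs.length - l

-- while r >= 0 and s[r] == ' ': r -= 1
def pvSpcWhileR (cs : List Char) (r : Int) : Int :=
  if 0 ≤ r then
    if PySem.List.pyGet? cs r = some ' ' then pvSpcWhileR cs (r - 1) else r
  else r
termination_by (r + 1).toNat
decreasing_by omega

def interior_space_positions_py (s : String) : List Int :=
  let cs := s.toList
  let n : Int := cs.length
  let l : Nat := pvSpcWhileL cs 0
  let r : Int := pvSpcWhileR cs (n - 1)
  if r - l < 1 then []
  else (PySem.List.pyRange (l + 1) r 1).filter (fun i => PySem.List.pyGet? cs i = some ' ')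

-- ===== PORT B =====
def interior_space_positions_py_alt (s : String) : List Int :=
  let parts := s.toList.splitOn ' '
  -- pos/gaps accumulator loop over parts[:-1]
  let st := (PySem.List.slice parts none (some (-1))).foldl
      (fun (st : List Int × Int) p => (st.1 ++ [st.2 + (p.length : Int)], st.2 + (p.length : Int) + 1))
      (([] : List Int), (0 : Int))
  let gaps := st.1
  -- nonempty = [k for k, p in enumerate(parts) if p]
  let ne := ((PySem.List.enumerate parts 0).filter (fun q => !q.2.isEmpty)).map (·.1)
  match ne with
  | [] => []
  | f :: _ => PySem.List.slice gaps (some f) (some (ne.getLastD 0))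

-- ===== PRECONDITION & SPEC =====
def Spec_interior_space_positions_py (s : String) (out : List Int) : Prop := out = interior_space_positions_py_alt s
instance (s : String) (out : List Int) : Decidable (Spec_interior_space_positions_py s out) := by unfold Spec_interior_space_positions_py; infer_instance

-- ===== CLAIM (what is proved, stated in full; the proofs are below) =====
def Claim_equal_interior_space_positions_py : Prop := ∀ (s : String), Dom_interior_space_positions_py s → Spec_interior_space_positions_py s (interior_space_positions_py s)

-- ===== LEMMAS AND PROOFS =====

-- positions of ' ' in xs, indexed from base (proof-only helper)
def idxSpaces (xs : List Char) (base : Int) : List Int :=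
  match xs with
  | [] => []
  | c :: t => (if c = ' ' then [base] else []) ++ idxSpaces t (base + 1)

-- gap position after each part, starting at pos (proof-only helper)
def gapsAux (ps : List (List Char)) (pos : Int) : List Int :=
  match ps with
  | [] => []
  | p :: t => (pos + p.length) :: gapsAux t (pos + p.length + 1)

-- the canonical value both ports compute
def pvTgt (cs : List Char) : List Int :=
  idxSpaces (PySem.Chars.stripChars cs [' '])
    ((cs.length : Int) - ((cs.dropWhile (fun c => [' '].contains c)).length : Int))

theorem idxSpaces_append (xs ys : List Char) (b : Int) :
    idxSpaces (xs ++ ys) b = idxSpaces xs b ++ idxSpaces ys (b + xs.length) := by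
  induction xs generalizing b with
  | nil => simp [idxSpaces]
  | cons c t ih =>
    simp only [List.cons_append, idxSpaces, ih, List.append_assoc, List.length_cons]
    have : b + 1 + (t.length : Int) = b + ((t.length : Int) + 1) := by ring
    rw [this]
    push_cast
    ring_nf

theorem pvSpcWhileL_eq (cs : List Char) (l : Nat) (hl : l ≤ cs.length) :
    pvSpcWhileL cs l = l + ((cs.drop l).takeWhile (· == ' ')).length := by
  fun_induction pvSpcWhileL cs l with
  | case1 l h hsp ih =>
    rw [ih (by omega), List.drop_eq_getElem_cons h]
    simp only [List.takeWhile_cons, hsp, if_true, List.length_cons]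
    omega
  | case2 l h hsp =>
    rw [List.drop_eq_getElem_cons h]
    simp [hsp]
  | case3 l h =>
    have he : l = cs.length := by omega
    subst he
    simp

theorem pvSpcWhileR_eq (cs : List Char) (r : Int) (hr : r < cs.length) :
    pvSpcWhileR cs r = r - (((cs.take (r + 1).toNat).reverse.takeWhile (· == ' ')).length : Int) := by
  fun_induction pvSpcWhileR cs r with
  | case1 r h0 hsp ih =>
    have hn : r.toNat < cs.length := by omega
    have hc : r = ((r.toNat : Nat) : Int) := by omega
    rw [hc, PySem.List.pyGet?_natCast] at hsp
    have hg : cs[r.toNat] = ' ' := by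
      have := List.getElem?_eq_getElem hn
      rw [this] at hsp; exact Option.some.inj hsp
    have ht : (r + 1).toNat = r.toNat + 1 := by omega
    rw [ht, List.take_add_one, List.getElem?_eq_getElem hn]
    simp only [Option.toList_some, List.reverse_append, List.reverse_cons, List.reverse_nil,
      List.nil_append, List.singleton_append, List.takeWhile_cons, hg]
    simp only [BEq.rfl, if_true, List.length_cons]
    rw [ih (by omega)]
    have : (r - 1 + 1).toNat = r.toNat := by omega
    rw [this]
    push_cast
    ring
  | case2 r h0 hsp =>
    have hn : r.toNat < cs.length := by omega
    have hc : r = ((r.toNat : Nat) : Int) := by omega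
    rw [hc, PySem.List.pyGet?_natCast] at hsp
    have hg : ¬ cs[r.toNat] = ' ' := by
      intro he; apply hsp; rw [List.getElem?_eq_getElem hn, he]
    have ht : (r + 1).toNat = r.toNat + 1 := by omega
    rw [ht, List.take_add_one, List.getElem?_eq_getElem hn]
    simp only [Option.toList_some, List.reverse_append, List.reverse_cons, List.reverse_nil,
      List.nil_append, List.singleton_append, List.takeWhile_cons]
    simp [hg]
  | case3 r h0 =>
    have : (r + 1).toNat = 0 := by omega
    simp [this]

theorem pyRange_filter_eq_idxSpaces (cs : List Char) (a b : Nat) (hb : b ≤ cs.length) :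
    (PySem.List.pyRange a b 1).filter (fun i => PySem.List.pyGet? cs i = some ' ')
      = idxSpaces ((cs.drop a).take (b - a)) a := by
  by_cases hab : b ≤ a
  · rw [PySem.List.pyRange_one_eq_nil (by exact_mod_cast Int.ofNat_le.mpr hab)]
    have : b - a = 0 := by omega
    simp [this, idxSpaces]
  · have hab' : a < b := by omega
    rw [PySem.List.pyRange_one_cons (by exact_mod_cast hab')]
    have ha : a < cs.length := by omega
    have hd : cs.drop a = cs[a] :: cs.drop (a + 1) := List.drop_eq_getElem_cons ha
    have hbma : b - a = (b - (a + 1)) + 1 := by omega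
    rw [hd, hbma, List.take_succ_cons]
    have hget : PySem.List.pyGet? cs ((a : Int)) = cs[a]? := PySem.List.pyGet?_natCast cs a
    have trec := pyRange_filter_eq_idxSpaces cs (a + 1) b hb
    simp only [List.filter_cons, idxSpaces]
    rw [List.getElem?_eq_getElem ha] at hget
    by_cases hc : cs[a] = ' '
    · have : ((a : Int) + 1) = ((a + 1 : Nat) : Int) := by push_cast; ring
      simp only [this, trec]
      simp [hget, hc]
    · have : ((a : Int) + 1) = ((a + 1 : Nat) : Int) := by push_cast; ring
      simp only [this, trec]
      simp [hget, hc]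
termination_by b - a
decreasing_by omega

theorem dropWhile_head?_not (p : Char → Bool) (l : List Char) (c : Char)
    (h : (l.dropWhile p).head? = some c) : p c = false := by
  induction l with
  | nil => simp at h
  | cons a t ih =>
    rw [List.dropWhile_cons] at h
    by_cases hpa : p a = true
    · rw [if_pos hpa] at h; exact ih h
    · rw [if_neg hpa] at h
      simp only [List.head?_cons, Option.some.injEq] at h
      rw [← h]
      simpa using hpa

theorem A_eq_strip (cs : List Char) :
    (if pvSpcWhileR cs ((cs.length : Int) - 1) - (pvSpcWhileL cs 0 : Int) < 1 then ([] : List Int)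
     else (PySem.List.pyRange ((pvSpcWhileL cs 0 : Int) + 1) (pvSpcWhileR cs ((cs.length : Int) - 1)) 1).filter
            (fun i => PySem.List.pyGet? cs i = some ' '))
    = idxSpaces (PySem.Chars.stripChars cs [' '])
        ((cs.length : Int) - ((cs.dropWhile (fun c => [' '].contains c)).length : Int)) := by
  have hp : (fun c : Char => (([' '] : List Char).contains c)) = (fun c : Char => c == ' ') := by
    funext c; by_cases hc : c = ' ' <;> simp [hc]
  have hsplit : cs.takeWhile (fun c => c == ' ') ++ cs.dropWhile (fun c => c == ' ') = cs :=
    List.takeWhile_append_dropWhile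
  have hLlen : (cs.takeWhile (fun c => c == ' ')).length + (cs.dropWhile (fun c => c == ' ')).length = cs.length := by
    have h := congrArg List.length hsplit
    simp only [List.length_append] at h
    exact h
  have hL : pvSpcWhileL cs 0 = (cs.takeWhile (fun c => c == ' ')).length := by
    rw [pvSpcWhileL_eq cs 0 (Nat.zero_le _)]; simp
  have hR : pvSpcWhileR cs ((cs.length : Int) - 1)
      = (cs.length : Int) - 1 - ((cs.reverse.takeWhile (fun c => c == ' ')).length : Int) := by
    rw [pvSpcWhileR_eq cs _ (by omega)]
    have h1 : ((cs.length : Int) - 1 + 1).toNat = cs.length := by omega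
    rw [h1, List.take_length]
  have hstr : PySem.Chars.stripChars cs [' ']
      = ((cs.dropWhile (fun c => c == ' ')).reverse.dropWhile (fun c => c == ' ')).reverse := by
    show (List.dropWhile _ (List.dropWhile _ cs).reverse).reverse = _
    rw [hp]
  rw [hstr, hp, hL, hR]
  have hoff : (cs.length : Int) - ((cs.dropWhile (fun c => c == ' ')).length : Int)
      = ((cs.takeWhile (fun c => c == ' ')).length : Int) := by omega
  rw [hoff]
  by_cases hm0 : cs.dropWhile (fun c => c == ' ') = []
  · -- all spaces: both sides are []
    have hall : cs.takeWhile (fun c => c == ' ') = cs := by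
      conv_rhs => rw [← hsplit]
      rw [hm0, List.append_nil]
    have hrall : cs.reverse.takeWhile (fun c => c == ' ') = cs.reverse := by
      rw [List.takeWhile_eq_self_iff]
      intro x hx
      exact List.takeWhile_eq_self_iff.mp hall x (List.mem_reverse.mp hx)
    rw [hm0, hall, hrall]
    simp only [List.reverse_nil, List.dropWhile_nil, idxSpaces, List.length_reverse]
    rw [if_pos (by omega)]
  · obtain ⟨mh, mt, hmht⟩ := List.exists_cons_of_ne_nil hm0
    have hmh : (mh == ' ') = false := by
      apply dropWhile_head?_not (fun c => c == ' ') cs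
      rw [hmht]; rfl
    have ht0 : (cs.dropWhile (fun c => c == ' ')).reverse.dropWhile (fun c => c == ' ') ≠ [] := by
      intro hte
      have hall2 := List.dropWhile_eq_nil_iff.mp hte
      have hmem : mh ∈ (cs.dropWhile (fun c => c == ' ')).reverse := by rw [hmht]; simp
      have := hall2 mh hmem
      rw [hmh] at this
      exact absurd this (by simp)
    obtain ⟨a, t', hat⟩ := List.exists_cons_of_ne_nil ht0
    have ha : (a == ' ') = false := by
      have hh : ((cs.dropWhile (fun c => c == ' ')).reverse.dropWhile (fun c => c == ' ')).head? = some a := by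
        rw [hat]; rfl
      exact dropWhile_head?_not (fun c => c == ' ') (cs.dropWhile (fun c => c == ' ')).reverse a hh
    have ha' : ¬ a = ' ' := by intro h; rw [h] at ha; simp at ha
    have htw : (cs.dropWhile (fun c => c == ' ')).reverse.takeWhile (fun c => c == ' ')
        ++ (cs.dropWhile (fun c => c == ' ')).reverse.dropWhile (fun c => c == ' ')
        = (cs.dropWhile (fun c => c == ' ')).reverse := List.takeWhile_append_dropWhile
    have len2 : ((cs.dropWhile (fun c => c == ' ')).reverse.takeWhile (fun c => c == ' ')).length
        + ((cs.dropWhile (fun c => c == ' ')).reverse.dropWhile (fun c => c == ' ')).length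
        = (cs.dropWhile (fun c => c == ' ')).length := by
      have h := congrArg List.length htw
      simp only [List.length_append, List.length_reverse] at h
      exact h
    have hT : cs.reverse.takeWhile (fun c => c == ' ')
        = (cs.dropWhile (fun c => c == ' ')).reverse.takeWhile (fun c => c == ' ') := by
      have hcr : cs.reverse = (cs.dropWhile (fun c => c == ' ')).reverse
          ++ (cs.takeWhile (fun c => c == ' ')).reverse := by
        conv_lhs => rw [← hsplit]
        rw [List.reverse_append]
      rw [hcr, List.takeWhile_append, if_neg]
      intro hlen
      have heq : (cs.dropWhile (fun c => c == ' ')).reverse.takeWhile (fun c => c == ' ')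
          = (cs.dropWhile (fun c => c == ' ')).reverse :=
        (List.takeWhile_prefix _).eq_of_length (by simpa using hlen)
      have hlen2 := congrArg List.length heq
      simp only [List.length_reverse] at hlen2
      have : ((cs.dropWhile (fun c => c == ' ')).reverse.dropWhile (fun c => c == ' ')).length = 0 := by
        omega
      exact ht0 (List.eq_nil_of_length_eq_zero this)
    have hTlen := congrArg List.length hT
    have hatlen := congrArg List.length hat
    simp only [List.length_cons] at hatlen
    have hm2 : ((a :: t').reverse)
        ++ ((cs.dropWhile (fun c => c == ' ')).reverse.takeWhile (fun c => c == ' ')).reverse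
        = cs.dropWhile (fun c => c == ' ') := by
      have h := congrArg List.reverse htw
      simp only [List.reverse_append, List.reverse_reverse] at h
      rw [hat] at h
      exact h
    rw [hat, hT]
    by_cases ht' : t' = []
    · -- stripped is a single non-space character: both sides are []
      subst ht'
      simp only [List.length_nil] at hatlen
      rw [if_pos (by omega)]
      simp [idxSpaces, ha']
    · obtain ⟨b, r', hbr⟩ := List.exists_cons_of_ne_nil (fun h => ht' (by simpa using congrArg List.reverse h) : t'.reverse ≠ [])
      have hbrlen := congrArg List.length hbr
      simp only [List.length_reverse, List.length_cons] at hbrlen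
      obtain ⟨u, hu⟩ : ∃ u, u = cs.takeWhile (fun c => c == ' ') := ⟨_, rfl⟩
      obtain ⟨w, hw⟩ : ∃ w, w = (cs.dropWhile (fun c => c == ' ')).reverse.takeWhile (fun c => c == ' ') := ⟨_, rfl⟩
      have hulen : u.length = (cs.takeWhile (fun c => c == ' ')).length := congrArg List.length hu
      have hwlen : w.length = ((cs.dropWhile (fun c => c == ' ')).reverse.takeWhile (fun c => c == ' ')).length :=
        congrArg List.length hw
      rw [show (cs.takeWhile (fun c => c == ' ')).length = u.length from hulen.symm,
          show ((cs.dropWhile (fun c => c == ' ')).reverse.takeWhile (fun c => c == ' ')).length = w.length from hwlen.symm]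
      have hm2w : (a :: t').reverse ++ w.reverse = cs.dropWhile (fun c => c == ' ') := by
        rw [hw]; exact hm2
      have hx : (a :: t').reverse ++ w.reverse = b :: (r' ++ ([a] ++ w.reverse)) := by
        rw [List.reverse_cons, hbr]
        simp [List.cons_append, List.append_assoc]
      have hb' : ¬ b = ' ' := by
        have h := hm2w
        rw [hx, hmht] at h
        injection h with h1 h2
        intro he
        rw [he] at h1
        rw [← h1] at hmh
        simp at hmh
      have hcs5 : cs = u ++ (b :: (r' ++ ([a] ++ w.reverse))) := by
        rw [hu, ← hx]
        conv_lhs => rw [← hsplit, ← hm2]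
        rw [hw]
      rw [if_neg (by omega)]
      have hc1 : (u.length : Int) + 1 = ((u.length + 1 : Nat) : Int) := by push_cast; ring
      have hc2 : (cs.length : Int) - 1 - (w.length : Int)
          = ((u.length + (r'.length + 2) - 1 : Nat) : Int) := by omega
      rw [hc1, hc2, pyRange_filter_eq_idxSpaces cs _ _ (by omega)]
      have harith : u.length + (r'.length + 2) - 1 - (u.length + 1) = r'.length := by omega
      rw [harith]
      have hdrop : cs.drop (u.length + 1) = r' ++ ([a] ++ w.reverse) := by
        conv_lhs => rw [hcs5]
        rw [List.drop_append, List.drop_eq_nil_of_le (by omega)]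
        have h1 : u.length + 1 - u.length = 1 := by omega
        rw [h1]
        simp
      rw [hdrop, List.take_append_of_le_length (le_refl _), List.take_length]
      rw [List.reverse_cons, hbr]
      simp only [List.cons_append, idxSpaces, hb', if_false, List.nil_append]
      rw [idxSpaces_append]
      simp only [idxSpaces, ha', if_false, List.append_nil]
      congr 1

theorem A_eq_tgt (cs : List Char) :
    (if pvSpcWhileR cs ((cs.length : Int) - 1) - (pvSpcWhileL cs 0 : Int) < 1 then ([] : List Int)
     else (PySem.List.pyRange ((pvSpcWhileL cs 0 : Int) + 1) (pvSpcWhileR cs ((cs.length : Int) - 1)) 1).filter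
            (fun i => PySem.List.pyGet? cs i = some ' '))
    = pvTgt cs := by
  unfold pvTgt
  exact A_eq_strip cs

theorem length_gapsAux (ps : List (List Char)) (pos : Int) : (gapsAux ps pos).length = ps.length := by
  induction ps generalizing pos with
  | nil => simp [gapsAux]
  | cons p t ih => simp [gapsAux, ih]

theorem gapsAux_append (xs ys : List (List Char)) (pos : Int) :
    gapsAux (xs ++ ys) pos
      = gapsAux xs pos ++ gapsAux ys (pos + (xs.map (fun p => (p.length : Int) + 1)).sum) := by
  induction xs generalizing pos with
  | nil => simp [gapsAux]
  | cons p t ih =>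
    simp only [List.cons_append, gapsAux, ih, List.map_cons, List.sum_cons]
    rw [show pos + ((p.length : Int) + 1 + (List.map (fun p => (p.length : Int) + 1) t).sum)
          = pos + (p.length : Int) + 1 + (List.map (fun p => (p.length : Int) + 1) t).sum from by ring]

theorem gapsAux_dropLast (ps : List (List Char)) (pos : Int) :
    gapsAux ps.dropLast pos = (gapsAux ps pos).take (ps.length - 1) := by
  rcases List.eq_nil_or_concat ps with h | ⟨q, g, h⟩
  · subst h; simp [gapsAux]
  · subst h
    rw [List.concat_eq_append, List.dropLast_concat, gapsAux_append]
    simp only [List.length_append, List.length_cons, List.length_nil]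
    have hlen : q.length + 1 - 1 = (gapsAux q pos).length := by rw [length_gapsAux]; omega
    rw [hlen, List.take_left]

theorem foldl_gaps (ps : List (List Char)) (acc : List Int) (pos : Int) :
    ps.foldl (fun (st : List Int × Int) p =>
        (st.1 ++ [st.2 + (p.length : Int)], st.2 + (p.length : Int) + 1)) (acc, pos)
      = (acc ++ gapsAux ps pos, pos + (ps.map (fun p => (p.length : Int) + 1)).sum) := by
  induction ps generalizing acc pos with
  | nil => simp [gapsAux]
  | cons p t ih =>
    simp only [List.foldl_cons, ih, gapsAux, List.map_cons, List.sum_cons, Prod.mk.injEq]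
    refine ⟨by simp, by ring⟩

theorem splitOnP_replicate_prefix (a : Nat) (rest : List Char) :
    (List.replicate a ' ' ++ rest).splitOnP (· == ' ')
      = List.replicate a ([] : List Char) ++ rest.splitOnP (· == ' ') := by
  induction a with
  | zero => simp
  | succ n ih =>
    rw [List.replicate_succ, List.cons_append, List.splitOnP_cons]
    simp only [BEq.rfl, if_true, ih, List.replicate_succ, List.cons_append]

theorem splitOnP_replicate (k : Nat) :
    (List.replicate k ' ').splitOnP (· == ' ') = List.replicate (k + 1) ([] : List Char) := by
  have h := splitOnP_replicate_prefix k []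
  simp only [List.append_nil, List.splitOnP_nil] at h
  rw [h, List.replicate_succ']

theorem splitOnP_append_replicate (b : Nat) (rest : List Char) :
    (rest ++ List.replicate b ' ').splitOnP (· == ' ')
      = rest.splitOnP (· == ' ') ++ List.replicate b ([] : List Char) := by
  induction b generalizing rest with
  | zero => simp
  | succ n ih =>
    have h1 : rest ++ List.replicate (n + 1) ' ' = (rest ++ [' ']) ++ List.replicate n ' ' := by
      rw [List.replicate_succ]; simp
    rw [h1, ih, List.splitOnP_append_cons _ rest [] ' ' (by simp), List.splitOnP_nil]
    simp [List.replicate_succ]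

theorem idx_eq_gaps (xs : List Char) (base : Int) :
    idxSpaces xs base = gapsAux ((xs.splitOnP (· == ' ')).dropLast) base := by
  induction xs generalizing base with
  | nil => simp [idxSpaces, gapsAux]
  | cons c t ih =>
    rw [List.splitOnP_cons]
    by_cases hc : c = ' '
    · subst hc
      simp only [BEq.rfl, if_true]
      rw [List.dropLast_cons_of_ne_nil (List.splitOnP_ne_nil _ t)]
      simp only [idxSpaces, if_true, List.singleton_append, gapsAux, List.length_nil]
      rw [ih]
      norm_num
    · have hcb : (c == ' ') = false := by simp [hc]
      rw [if_neg (by simp [hc])]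
      obtain ⟨q0, qs, hq⟩ := List.exists_cons_of_ne_nil (List.splitOnP_ne_nil (· == ' ') t)
      rw [hq]
      simp only [List.modifyHead_cons]
      simp only [idxSpaces, hc, if_false, List.nil_append]
      rw [ih, hq]
      cases qs with
      | nil => simp [gapsAux]
      | cons q1 qs' =>
        rw [show (q0 :: q1 :: qs').dropLast = q0 :: (q1 :: qs').dropLast from
              List.dropLast_cons_of_ne_nil (by simp),
            show ((c :: q0) :: q1 :: qs').dropLast = (c :: q0) :: (q1 :: qs').dropLast from
              List.dropLast_cons_of_ne_nil (by simp)]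
        simp only [gapsAux, List.length_cons]
        congr 1
        · push_cast; ring
        · congr 1
          push_cast; ring

theorem splitOnP_head_shape (c : Char) (t : List Char) (hc : (c == ' ') = false) :
    ∃ q0 qs, (c :: t).splitOnP (· == ' ') = (c :: q0) :: qs := by
  rw [List.splitOnP_cons, if_neg (by simp at hc ⊢; exact hc)]
  obtain ⟨q0, qs, hq⟩ := List.exists_cons_of_ne_nil (List.splitOnP_ne_nil (· == ' ') t)
  exact ⟨q0, qs, by rw [hq]; rfl⟩

theorem splitOnP_getLast_ne_nil (l : List Char) (hne : l ≠ [])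
    (hc : ∀ h : l ≠ [], (l.getLast h == ' ') = false) :
    ∃ g, (l.splitOnP (· == ' ')).getLast? = some g ∧ g ≠ [] := by
  induction l with
  | nil => exact absurd rfl hne
  | cons c t ih =>
    cases t with
    | nil =>
      have hcb := hc (by simp)
      simp only [List.getLast_singleton] at hcb
      rw [List.splitOnP_cons, if_neg (by simp at hcb ⊢; exact hcb), List.splitOnP_nil]
      exact ⟨[c], by simp⟩
    | cons d t' =>
      have hlast : ∀ h : (d :: t') ≠ [], ((d :: t').getLast h == ' ') = false := by
        intro h
        have := hc (by simp)
        rwa [List.getLast_cons h] at this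
      obtain ⟨g, hg, hgne⟩ := ih (by simp) hlast
      rw [List.splitOnP_cons]
      by_cases hcc : (c == ' ') = true
      · rw [if_pos hcc]
        obtain ⟨r0, rs, hr⟩ := List.exists_cons_of_ne_nil (List.splitOnP_ne_nil (· == ' ') (d :: t'))
        rw [hr, List.getLast?_cons_cons]
        rw [hr] at hg
        exact ⟨g, hg, hgne⟩
      · rw [if_neg hcc]
        obtain ⟨q0, qs, hq⟩ := List.exists_cons_of_ne_nil (List.splitOnP_ne_nil (· == ' ') (d :: t'))
        rw [hq]
        simp only [List.modifyHead_cons]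
        cases qs with
        | nil => exact ⟨c :: q0, by simp⟩
        | cons q1 qs' =>
          rw [hq, List.getLast?_cons_cons] at hg
          rw [List.getLast?_cons_cons]
          exact ⟨g, hg, hgne⟩

theorem fe_rep (k : Nat) (st : Int) :
    ((PySem.List.enumerate (List.replicate k ([] : List Char)) st).filter
      (fun q => !q.2.isEmpty)) = [] := by
  induction k generalizing st with
  | zero => simp [PySem.List.enumerate_nil]
  | succ n ih =>
    rw [List.replicate_succ, PySem.List.enumerate_cons, List.filter_cons]
    simp only [List.isEmpty_nil, Bool.not_true]
    exact ih (st + 1)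

theorem filter_getLast? {α : Type} (l : List α) (p : α → Bool) (x : α)
    (h : l.getLast? = some x) (hp : p x = true) :
    (l.filter p).getLast? = some x := by
  obtain ⟨l', hl⟩ := List.getLast?_eq_some_iff.mp h
  subst hl
  rw [List.filter_append]
  simp only [List.filter_cons, hp, if_true, List.filter_nil]
  simp [List.getLast?_append]

theorem B_core (cs : List Char) :
    (let parts := cs.splitOn ' '
     let st := (PySem.List.slice parts none (some (-1))).foldl
        (fun (st : List Int × Int) p => (st.1 ++ [st.2 + (p.length : Int)], st.2 + (p.length : Int) + 1))
        (([] : List Int), (0 : Int))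
     let gaps := st.1
     let ne := ((PySem.List.enumerate parts 0).filter (fun q => !q.2.isEmpty)).map (·.1)
     match ne with
     | [] => ([] : List Int)
     | f :: _ => PySem.List.slice gaps (some f) (some (ne.getLastD 0))) = pvTgt cs := by
  dsimp only
  have hp : (fun c : Char => (([' '] : List Char).contains c)) = (fun c : Char => c == ' ') := by
    funext c; by_cases hc : c = ' ' <;> simp [hc]
  have hstr : PySem.Chars.stripChars cs [' ']
      = ((cs.dropWhile (fun c => c == ' ')).reverse.dropWhile (fun c => c == ' ')).reverse := by
    show (List.dropWhile _ (List.dropWhile _ cs).reverse).reverse = _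
    rw [hp]
  have hsplitOn : cs.splitOn ' ' = cs.splitOnP (· == ' ') := rfl
  have hsplit : cs.takeWhile (fun c => c == ' ') ++ cs.dropWhile (fun c => c == ' ') = cs :=
    List.takeWhile_append_dropWhile
  by_cases hm0 : cs.dropWhile (fun c => c == ' ') = []
  · -- all spaces
    have hall : cs.takeWhile (fun c => c == ' ') = cs := by
      conv_rhs => rw [← hsplit]
      rw [hm0, List.append_nil]
    have hcsrep : cs = List.replicate cs.length ' ' := by
      apply List.eq_replicate_of_mem
      intro x hx
      have := List.takeWhile_eq_self_iff.mp hall x hx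
      simpa using this
    have hparts : cs.splitOn ' ' = List.replicate (cs.length + 1) ([] : List Char) := by
      rw [hsplitOn]
      conv_lhs => rw [hcsrep]
      exact splitOnP_replicate _
    have hne : ((PySem.List.enumerate (cs.splitOn ' ') 0).filter (fun q => !q.2.isEmpty)).map (·.1)
        = ([] : List Int) := by
      rw [hparts, fe_rep]
      rfl
    rw [hne]
    unfold pvTgt
    rw [hstr, hm0]
    simp [idxSpaces]
  · -- non-trivial string
    obtain ⟨mh, mt, hmht⟩ := List.exists_cons_of_ne_nil hm0
    have hmh : (mh == ' ') = false := by
      apply dropWhile_head?_not (fun c => c == ' ') cs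
      rw [hmht]; rfl
    have ht0 : (cs.dropWhile (fun c => c == ' ')).reverse.dropWhile (fun c => c == ' ') ≠ [] := by
      intro hte
      have hall2 := List.dropWhile_eq_nil_iff.mp hte
      have hmem : mh ∈ (cs.dropWhile (fun c => c == ' ')).reverse := by rw [hmht]; simp
      have := hall2 mh hmem
      rw [hmh] at this
      exact absurd this (by simp)
    -- name the three segments
    obtain ⟨u, hu⟩ : ∃ u, u = cs.takeWhile (fun c => c == ' ') := ⟨_, rfl⟩
    obtain ⟨w, hw⟩ : ∃ w, w = (cs.dropWhile (fun c => c == ' ')).reverse.takeWhile (fun c => c == ' ') := ⟨_, rfl⟩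
    obtain ⟨d, hd⟩ : ∃ d, d = (cs.dropWhile (fun c => c == ' ')).reverse.dropWhile (fun c => c == ' ') := ⟨_, rfl⟩
    have hurep : u = List.replicate u.length ' ' := by
      apply List.eq_replicate_of_mem
      intro x hx
      rw [hu] at hx
      have := List.mem_takeWhile_imp hx
      simpa using this
    have hwrep : w = List.replicate w.length ' ' := by
      apply List.eq_replicate_of_mem
      intro x hx
      rw [hw] at hx
      have := List.mem_takeWhile_imp hx
      simpa using this
    have hm2 : cs.dropWhile (fun c => c == ' ') = d.reverse ++ List.replicate w.length ' ' := by
      have h : w ++ d = (cs.dropWhile (fun c => c == ' ')).reverse := by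
        rw [hw, hd]; exact List.takeWhile_append_dropWhile
      have h2 := congrArg List.reverse h
      simp only [List.reverse_append, List.reverse_reverse] at h2
      rw [← h2]
      rw [show w.reverse = List.replicate w.length ' ' from by
        conv_lhs => rw [hwrep]
        rw [List.reverse_replicate]]
    have hcs : cs = List.replicate u.length ' ' ++ (d.reverse ++ List.replicate w.length ' ') := by
      conv_lhs => rw [← hsplit, ← hu, hurep, hm2]
    -- d = d' ++ [dg]; mid = d.reverse = dg :: d'.reverse
    have hdne : d ≠ [] := by rw [hd]; exact ht0
    obtain ⟨d', dg, hdg⟩ := (List.eq_nil_or_concat d).resolve_left hdne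
    have hmidcons : d.reverse = dg :: d'.reverse := by
      rw [hdg, List.concat_eq_append, List.reverse_append]
      rfl
    have hdg_ne : (dg == ' ') = false := by
      have h1 : cs.dropWhile (fun c => c == ' ') = dg :: (d'.reverse ++ List.replicate w.length ' ') := by
        rw [hm2, hmidcons]; rfl
      rw [hmht] at h1
      injection h1 with h1a h1b
      rw [← h1a]
      exact hmh
    have hlastd : ∀ h : d.reverse ≠ [], (d.reverse.getLast h == ' ') = false := by
      intro h
      obtain ⟨d0, d1, hd01⟩ := List.exists_cons_of_ne_nil (show d ≠ [] from hdne)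
      have hd0 : (d0 == ' ') = false := by
        apply dropWhile_head?_not (fun c => c == ' ') (cs.dropWhile (fun c => c == ' ')).reverse
        rw [← hd, hd01]; rfl
      have hg1 : d.reverse.getLast? = some d0 := by
        rw [List.getLast?_reverse, hd01]; rfl
      have hg2 : d.reverse.getLast? = some (d.reverse.getLast h) := List.getLast?_eq_some_getLast h
      rw [hg1] at hg2
      rw [show d.reverse.getLast h = d0 from (Option.some.inj hg2).symm]
      exact hd0
    -- the split of the interior
    obtain ⟨q0, qs, hQhead⟩ := splitOnP_head_shape dg d'.reverse hdg_ne
    obtain ⟨g, hQg, hgne⟩ := splitOnP_getLast_ne_nil d.reverse (by rw [hmidcons]; simp) hlastd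
    obtain ⟨Qd, hQd⟩ := List.getLast?_eq_some_iff.mp hQg
    -- parts
    have hparts : cs.splitOn ' '
        = List.replicate u.length ([] : List Char)
          ++ (d.reverse.splitOnP (· == ' ') ++ List.replicate w.length ([] : List Char)) := by
      rw [hsplitOn]
      conv_lhs => rw [hcs]
      rw [splitOnP_replicate_prefix, splitOnP_append_replicate]
    -- the gaps list
    have hfold : ((PySem.List.slice (cs.splitOn ' ') none (some (-1))).foldl
        (fun (st : List Int × Int) p => (st.1 ++ [st.2 + (p.length : Int)], st.2 + (p.length : Int) + 1))
        (([] : List Int), (0 : Int))).1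
        = gapsAux (cs.splitOn ' ').dropLast 0 := by
      rw [PySem.List.slice_to_neg_one, foldl_gaps]
      simp
    -- the nonempty-part index list: head
    have hfiltAll : (PySem.List.enumerate (cs.splitOn ' ') 0).filter (fun q => !q.2.isEmpty)
        = (PySem.List.enumerate (d.reverse.splitOnP (· == ' ')) ((0 : Int) + (u.length : Int))).filter
            (fun q => !q.2.isEmpty) := by
      rw [hparts, PySem.List.enumerate_append, PySem.List.enumerate_append,
          List.filter_append, List.filter_append, fe_rep, fe_rep]
      simp [List.length_replicate]
    have hfilt2 : (PySem.List.enumerate (d.reverse.splitOnP (· == ' ')) ((0 : Int) + (u.length : Int))).filter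
            (fun q => !q.2.isEmpty)
        = ((0 : Int) + (u.length : Int), dg :: q0)
            :: (PySem.List.enumerate qs ((0 : Int) + (u.length : Int) + 1)).filter (fun q => !q.2.isEmpty) := by
      rw [hmidcons, hQhead, PySem.List.enumerate_cons, List.filter_cons]
      simp
    have hne : ((PySem.List.enumerate (cs.splitOn ' ') 0).filter (fun q => !q.2.isEmpty)).map (·.1)
        = ((0 : Int) + (u.length : Int))
            :: ((PySem.List.enumerate qs ((0 : Int) + (u.length : Int) + 1)).filter (fun q => !q.2.isEmpty)).map (·.1) := by
      rw [hfiltAll, hfilt2, List.map_cons]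
    -- the nonempty-part index list: last
    have hlastE : (PySem.List.enumerate (d.reverse.splitOnP (· == ' ')) ((0 : Int) + (u.length : Int))).getLast?
        = some ((0 : Int) + (u.length : Int) + (Qd.length : Int), g) := by
      rw [hQd, PySem.List.enumerate_append]
      rw [show PySem.List.enumerate [g] ((0 : Int) + (u.length : Int) + (Qd.length : Int)) =
            [((0 : Int) + (u.length : Int) + (Qd.length : Int), g)] from by
        rw [PySem.List.enumerate_cons, PySem.List.enumerate_nil]]
      exact List.getLast?_concat
    have hlastF : (((PySem.List.enumerate (cs.splitOn ' ') 0).filter (fun q => !q.2.isEmpty)).map (·.1)).getLast?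
        = some ((0 : Int) + (u.length : Int) + (Qd.length : Int)) := by
      rw [hfiltAll, List.getLast?_map]
      rw [filter_getLast? _ _ _ hlastE (by simp [hgne])]
      rfl
    rw [hne]
    rw [show (((0 : Int) + (u.length : Int))
            :: ((PySem.List.enumerate qs ((0 : Int) + (u.length : Int) + 1)).filter (fun q => !q.2.isEmpty)).map (·.1)).getLastD 0
        = ((0 : Int) + (u.length : Int) + (Qd.length : Int)) from by
      rw [List.getLastD_eq_getLast?, ← hne, hlastF]; rfl]
    rw [hfold]
    -- reduce the slice
    have hcast1 : (0 : Int) + (u.length : Int) = ((u.length : Nat) : Int) := by ring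
    have hcast2 : (0 : Int) + (u.length : Int) + (Qd.length : Int) = ((u.length + Qd.length : Nat) : Int) := by
      push_cast; ring
    rw [hcast2, hcast1]
    show PySem.List.slice (gapsAux (List.splitOn ' ' cs).dropLast 0)
        (some ((u.length : Nat) : Int)) (some ((u.length + Qd.length : Nat) : Int)) = pvTgt cs
    rw [PySem.List.slice_natCast]
    have hsub : u.length + Qd.length - u.length = Qd.length := by omega
    rw [hsub]
    -- structure of gapsAux over parts
    have hlenQ : (d.reverse.splitOnP (· == ' ')).length = Qd.length + 1 := by
      rw [hQd, List.length_append, List.length_cons, List.length_nil]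
    have hG : gapsAux (cs.splitOn ' ') 0
        = gapsAux (List.replicate u.length ([] : List Char)) 0
          ++ gapsAux (d.reverse.splitOnP (· == ' ') ++ List.replicate w.length ([] : List Char)) ((0 : Int) + (u.length : Int)) := by
      rw [hparts, gapsAux_append]
      congr 2
      rw [List.map_replicate]
      simp
    have hXlen : (gapsAux (List.replicate u.length ([] : List Char)) 0).length = u.length := by
      rw [length_gapsAux, List.length_replicate]
    have hdropLast : gapsAux (cs.splitOn ' ').dropLast 0
        = (gapsAux (cs.splitOn ' ') 0).take ((cs.splitOn ' ').length - 1) := gapsAux_dropLast _ _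
    have hlenParts : (cs.splitOn ' ').length = u.length + (Qd.length + 1) + w.length := by
      rw [hparts, List.length_append, List.length_append, List.length_replicate, List.length_replicate, hlenQ]
      omega
    rw [hdropLast, hlenParts, hG, List.drop_take]
    rw [show List.drop u.length
          (gapsAux (List.replicate u.length ([] : List Char)) 0
            ++ gapsAux (d.reverse.splitOnP (· == ' ') ++ List.replicate w.length ([] : List Char)) ((0 : Int) + (u.length : Int)))
        = gapsAux (d.reverse.splitOnP (· == ' ') ++ List.replicate w.length ([] : List Char)) ((0 : Int) + (u.length : Int)) from by
      have h := List.drop_left (l₁ := gapsAux (List.replicate u.length ([] : List Char)) 0)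
          (l₂ := gapsAux (d.reverse.splitOnP (· == ' ') ++ List.replicate w.length ([] : List Char)) ((0 : Int) + (u.length : Int)))
      rwa [hXlen] at h]
    rw [List.take_take]
    rw [show min Qd.length (u.length + (Qd.length + 1) + w.length - 1 - u.length) = Qd.length from by omega]
    rw [gapsAux_append, List.take_append_of_le_length (by rw [length_gapsAux, hlenQ]; omega)]
    have hQdrop : (d.reverse.splitOnP (· == ' ')).dropLast = Qd := by
      rw [hQd, List.dropLast_concat]
    rw [show List.take Qd.length (gapsAux (d.reverse.splitOnP (· == ' ')) ((0 : Int) + (u.length : Int)))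
        = gapsAux Qd ((0 : Int) + (u.length : Int)) from by
      rw [← hQdrop, gapsAux_dropLast, hlenQ, hQdrop]
      congr 1]
    -- the target
    unfold pvTgt
    rw [hstr, ← hd, idx_eq_gaps]
    have hofs : (cs.length : Int) - ((cs.dropWhile (fun c => [' '].contains c)).length : Int)
        = (0 : Int) + (u.length : Int) := by
      rw [hp]
      have h := congrArg List.length hsplit
      simp only [List.length_append] at h
      rw [← hu] at h
      omega
    rw [hofs, hQdrop]


theorem B_eq_tgt (s : String) : interior_space_positions_py_alt s = pvTgt s.toList :=
  B_core s.toList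

-- ===== VERDICT (by name: the statement is the Claim_ definition above) =====
theorem interior_space_positions_py_spec : Claim_equal_interior_space_positions_py := by
  intro s _
  show interior_space_positions_py s = interior_space_positions_py_alt s
  rw [B_eq_tgt]
  exact A_eq_tgt s.toList
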